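-- pv_equiv track=rewrite | github.com/nullenc0de/servicelens | servicelens.py | extract_verification_tokens
-- ===== SOURCE A (Python) =====
-- from collections import defaultdict
--
-- def extract_verification_tokens(dns_info):
--     """Extract and categorize verification tokens from TXT records"""
--     verifications = defaultdict(list)
--
--     for domain, info in dns_info.items():
--         txt_records = info.get('txt', [])
--
--         for record in txt_records:
--             record_clean = record.strip('"')
--
--             # Microsoft verification
--             if record_clean.startswith('MS='):
--                 verifications['Microsoft 365'].append(domain)
--             # Apple domain verification
--             elif 'apple-domain-verification' in record_clean:
--                 verifications['Apple'].append(domain)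
--             # DocuSign verification
--             elif 'docusign' in record_clean.lower():
--                 verifications['DocuSign'].append(domain)
--             # MongoDB verification
--             elif 'mongodb-site-verification' in record_clean:
--                 verifications['MongoDB'].append(domain)
--             # GlobalSign verification
--             elif 'globalsign-domain-verification' in record_clean:
--                 verifications['GlobalSign'].append(domain)
--             # Google verification
--             elif 'google-site-verification' in record_clean:
--                 verifications['Google'].append(domain)
--             # Adobe IDP verification
--             elif 'adobe-idp-site-verification' in record_clean:
--                 verifications['Adobe IDP'].append(domain)
--             # Atlassian verification
--             elif 'atlassian-domain-verification' in record_clean: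
--                 verifications['Atlassian'].append(domain)
--             # Facebook domain verification
--             elif 'facebook-domain-verification' in record_clean:
--                 verifications['Facebook'].append(domain)
--             # Zoom verification
--             elif 'zoom-domain-verification' in record_clean:
--                 verifications['Zoom'].append(domain)
--             # Stripe verification
--             elif 'stripe-verification' in record_clean:
--                 verifications['Stripe'].append(domain)
--             # Webex verification
--             elif 'cisco-ci-domain-verification' in record_clean:
--                 verifications['Webex/Cisco'].append(domain)
--             # Slack verification
--             elif 'slack-site-verification' in record_clean:
--                 verifications['Slack'].append(domain)
--             # GitHub verification
--             elif 'github-domain-verification' in record_clean or 'github-challenge' in record_clean: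
--                 verifications['GitHub'].append(domain)
--             # Okta verification
--             elif 'okta-domain-verification' in record_clean:
--                 verifications['Okta'].append(domain)
--
--     return verifications
-- ===== SOURCE B (Python) =====
-- from collections import defaultdict
--
-- # Two-phase: every rule is evaluated for each record (no elif short-circuit), all
-- # matching (priority, label) pairs are collected and min picks the winner; then a
-- # separate grouping pass builds the defaultdict from the flat (label, domain) list.
-- def _candidates(rc):
--     low = rc.lower()
--     cands = []
--     if rc.startswith('MS='):
--         cands.append((0, 'Microsoft 365'))
--     if 'apple-domain-verification' in rc:
--         cands.append((1, 'Apple'))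
--     if 'docusign' in low:
--         cands.append((2, 'DocuSign'))
--     if 'mongodb-site-verification' in rc:
--         cands.append((3, 'MongoDB'))
--     if 'globalsign-domain-verification' in rc:
--         cands.append((4, 'GlobalSign'))
--     if 'google-site-verification' in rc:
--         cands.append((5, 'Google'))
--     if 'adobe-idp-site-verification' in rc:
--         cands.append((6, 'Adobe IDP'))
--     if 'atlassian-domain-verification' in rc:
--         cands.append((7, 'Atlassian'))
--     if 'facebook-domain-verification' in rc:
--         cands.append((8, 'Facebook'))
--     if 'zoom-domain-verification' in rc:
--         cands.append((9, 'Zoom'))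
--     if 'stripe-verification' in rc:
--         cands.append((10, 'Stripe'))
--     if 'cisco-ci-domain-verification' in rc:
--         cands.append((11, 'Webex/Cisco'))
--     if 'slack-site-verification' in rc:
--         cands.append((12, 'Slack'))
--     if 'github-domain-verification' in rc or 'github-challenge' in rc:
--         cands.append((13, 'GitHub'))
--     if 'okta-domain-verification' in rc:
--         cands.append((14, 'Okta'))
--     return cands
--
-- def _best_label(rc):
--     cands = _candidates(rc)
--     if not cands:
--         return None
--     return min(cands, key=lambda c: c[0])[1]
--
-- def extract_verification_tokens(dns_info):
--     """Extract and categorize verification tokens from TXT records"""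
--     labeled = []
--     for domain, info in dns_info.items():
--         for record in info.get('txt', []):
--             label = _best_label(record.strip('"'))
--             if label is not None:
--                 labeled.append((label, domain))
--     verifications = defaultdict(list)
--     for label, domain in labeled:
--         verifications[label].append(domain)
--     return verifications
-- ===== Notes on version B (the rewrite author's own statement) =====
-- stated objective: alternative
-- what changed: Replaces the first-match if/elif chain with inline dict mutation by a two-phase pipeline: every rule is evaluated per record, all matching (priority,label) pairs are collected and min selects the winner, then a separate pass groups the flat (label,domain) list into the dict.
import Mathlib
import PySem

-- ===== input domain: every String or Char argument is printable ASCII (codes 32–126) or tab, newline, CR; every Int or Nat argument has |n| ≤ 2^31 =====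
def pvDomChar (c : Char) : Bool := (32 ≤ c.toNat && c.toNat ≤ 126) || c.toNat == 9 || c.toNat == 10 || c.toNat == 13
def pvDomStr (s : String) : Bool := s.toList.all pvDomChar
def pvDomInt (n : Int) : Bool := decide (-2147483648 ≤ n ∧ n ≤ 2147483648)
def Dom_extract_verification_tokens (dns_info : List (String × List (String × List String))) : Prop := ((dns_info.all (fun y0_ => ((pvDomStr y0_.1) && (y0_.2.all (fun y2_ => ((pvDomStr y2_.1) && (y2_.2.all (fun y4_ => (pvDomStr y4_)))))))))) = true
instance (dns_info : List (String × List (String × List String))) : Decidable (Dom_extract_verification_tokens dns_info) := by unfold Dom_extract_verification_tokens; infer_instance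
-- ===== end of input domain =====

-- B replaces A's first-match if/elif chain with a two-phase pipeline: collect all matching
-- (priority, label) candidates per record and pick the winner with min, then group the flat
-- (label, domain) list into the dict in a second pass (alternative decomposition; same cost).

-- ===== PORT A =====
-- inner loop body of A: the literal if/elif chain, appending via defaultdict semantics
def pvStepA (domain : String) (v : PySem.Dict String (List String)) (record : String) : PySem.Dict String (List String) :=
  let rc := PySem.Str.stripChars record "\""
  if PySem.Str.startswith rc "MS=" then v.modify "Microsoft 365" [] (· ++ [domain])
  else if PySem.Str.isIn "apple-domain-verification" rc then v.modify "Apple" [] (· ++ [domain])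
  else if PySem.Str.isIn "docusign" (PySem.Str.lower rc) then v.modify "DocuSign" [] (· ++ [domain])
  else if PySem.Str.isIn "mongodb-site-verification" rc then v.modify "MongoDB" [] (· ++ [domain])
  else if PySem.Str.isIn "globalsign-domain-verification" rc then v.modify "GlobalSign" [] (· ++ [domain])
  else if PySem.Str.isIn "google-site-verification" rc then v.modify "Google" [] (· ++ [domain])
  else if PySem.Str.isIn "adobe-idp-site-verification" rc then v.modify "Adobe IDP" [] (· ++ [domain])
  else if PySem.Str.isIn "atlassian-domain-verification" rc then v.modify "Atlassian" [] (· ++ [domain])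
  else if PySem.Str.isIn "facebook-domain-verification" rc then v.modify "Facebook" [] (· ++ [domain])
  else if PySem.Str.isIn "zoom-domain-verification" rc then v.modify "Zoom" [] (· ++ [domain])
  else if PySem.Str.isIn "stripe-verification" rc then v.modify "Stripe" [] (· ++ [domain])
  else if PySem.Str.isIn "cisco-ci-domain-verification" rc then v.modify "Webex/Cisco" [] (· ++ [domain])
  else if PySem.Str.isIn "slack-site-verification" rc then v.modify "Slack" [] (· ++ [domain])
  else if (PySem.Str.isIn "github-domain-verification" rc || PySem.Str.isIn "github-challenge" rc) then v.modify "GitHub" [] (· ++ [domain])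
  else if PySem.Str.isIn "okta-domain-verification" rc then v.modify "Okta" [] (· ++ [domain])
  else v

def extract_verification_tokens (dns_info : List (String × List (String × List String))) : List (String × List String) :=
  (dns_info.foldl
    (fun v p => (((PySem.Dict.mk p.2).getD "txt" []).foldl (pvStepA p.1) v))
    PySem.Dict.empty).items

-- ===== PORT B =====
-- cands.append((i, label)) guarded by one rule test (Source B: _candidates builds via conditional appends)
def pvOpt (b : Bool) (i : Nat) (l : String) : List (Nat × String) :=
  if b then [(i, l)] else []

-- Source B _candidates: every rule evaluated, all matches collected with their priority index
def pvCands (rc : String) : List (Nat × String) :=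
  let low := PySem.Str.lower rc
  pvOpt (PySem.Str.startswith rc "MS=") 0 "Microsoft 365" ++
  pvOpt (PySem.Str.isIn "apple-domain-verification" rc) 1 "Apple" ++
  pvOpt (PySem.Str.isIn "docusign" low) 2 "DocuSign" ++
  pvOpt (PySem.Str.isIn "mongodb-site-verification" rc) 3 "MongoDB" ++
  pvOpt (PySem.Str.isIn "globalsign-domain-verification" rc) 4 "GlobalSign" ++
  pvOpt (PySem.Str.isIn "google-site-verification" rc) 5 "Google" ++
  pvOpt (PySem.Str.isIn "adobe-idp-site-verification" rc) 6 "Adobe IDP" ++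
  pvOpt (PySem.Str.isIn "atlassian-domain-verification" rc) 7 "Atlassian" ++
  pvOpt (PySem.Str.isIn "facebook-domain-verification" rc) 8 "Facebook" ++
  pvOpt (PySem.Str.isIn "zoom-domain-verification" rc) 9 "Zoom" ++
  pvOpt (PySem.Str.isIn "stripe-verification" rc) 10 "Stripe" ++
  pvOpt (PySem.Str.isIn "cisco-ci-domain-verification" rc) 11 "Webex/Cisco" ++
  pvOpt (PySem.Str.isIn "slack-site-verification" rc) 12 "Slack" ++
  pvOpt (PySem.Str.isIn "github-domain-verification" rc || PySem.Str.isIn "github-challenge" rc) 13 "GitHub" ++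
  pvOpt (PySem.Str.isIn "okta-domain-verification" rc) 14 "Okta"

-- Source B _best_label: min over the candidates by priority (None if no rule matched)
def pvBestLabel (rc : String) : Option String :=
  match PySem.List.min? (pvCands rc) (fun c => c.1) with
  | some c => some c.2
  | none => none

-- Source B first loop body: append (label, domain) when the record classifies
def pvCollect (domain : String) (acc : List (String × String)) (record : String) : List (String × String) :=
  match pvBestLabel (PySem.Str.stripChars record "\"") with
  | some l => acc ++ [(l, domain)]
  | none => acc

-- Source B second loop body: group one (label, domain) pair into the defaultdict
def pvGroupStep (v : PySem.Dict String (List String)) (q : String × String) : PySem.Dict String (List String) :=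
  v.modify q.1 [] (· ++ [q.2])

def extract_verification_tokens_alt (dns_info : List (String × List (String × List String))) : List (String × List String) :=
  let labeled := dns_info.foldl
    (fun acc p => (((PySem.Dict.mk p.2).getD "txt" []).foldl (pvCollect p.1) acc)) []
  (labeled.foldl pvGroupStep PySem.Dict.empty).items

-- ===== PRECONDITION & SPEC =====
def Spec_extract_verification_tokens (dns_info : List (String × List (String × List String))) (out : List (String × List String)) : Prop := out = extract_verification_tokens_alt dns_info
instance (dns_info : List (String × List (String × List String))) (out : List (String × List String)) : Decidable (Spec_extract_verification_tokens dns_info out) := by unfold Spec_extract_verification_tokens; infer_instance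

-- ===== CLAIM (what is proved, stated in full; the proofs are below) =====
def Claim_equal_extract_verification_tokens : Prop := ∀ (dns_info : List (String × List (String × List String))), Dom_extract_verification_tokens dns_info → Spec_extract_verification_tokens dns_info (extract_verification_tokens dns_info)

-- ===== LEMMAS AND PROOFS =====

-- abstract view of _candidates: a list of (guard, priority, label) entries
def pvFlat : List (Bool × Nat × String) → List (Nat × String)
  | [] => []
  | e :: t => pvOpt e.1 e.2.1 e.2.2 ++ pvFlat t

def pvFirst : List (Bool × Nat × String) → Option (Nat × String)
  | [] => none
  | e :: t => if e.1 then some (e.2.1, e.2.2) else pvFirst t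

def pvEntries (rc : String) : List (Bool × Nat × String) :=
  [ (PySem.Str.startswith rc "MS=", 0, "Microsoft 365"),
    (PySem.Str.isIn "apple-domain-verification" rc, 1, "Apple"),
    (PySem.Str.isIn "docusign" (PySem.Str.lower rc), 2, "DocuSign"),
    (PySem.Str.isIn "mongodb-site-verification" rc, 3, "MongoDB"),
    (PySem.Str.isIn "globalsign-domain-verification" rc, 4, "GlobalSign"),
    (PySem.Str.isIn "google-site-verification" rc, 5, "Google"),
    (PySem.Str.isIn "adobe-idp-site-verification" rc, 6, "Adobe IDP"),
    (PySem.Str.isIn "atlassian-domain-verification" rc, 7, "Atlassian"),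
    (PySem.Str.isIn "facebook-domain-verification" rc, 8, "Facebook"),
    (PySem.Str.isIn "zoom-domain-verification" rc, 9, "Zoom"),
    (PySem.Str.isIn "stripe-verification" rc, 10, "Stripe"),
    (PySem.Str.isIn "cisco-ci-domain-verification" rc, 11, "Webex/Cisco"),
    (PySem.Str.isIn "slack-site-verification" rc, 12, "Slack"),
    (PySem.Str.isIn "github-domain-verification" rc || PySem.Str.isIn "github-challenge" rc, 13, "GitHub"),
    (PySem.Str.isIn "okta-domain-verification" rc, 14, "Okta") ]

lemma pvCands_eq (rc : String) : pvCands rc = pvFlat (pvEntries rc) := by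
  simp [pvCands, pvEntries, pvFlat]

lemma pvMem_flat {x : Nat × String} {es : List (Bool × Nat × String)} (h : x ∈ pvFlat es) :
    ∃ e ∈ es, x = (e.2.1, e.2.2) := by
  induction es with
  | nil => simp [pvFlat] at h
  | cons e t ih =>
    simp only [pvFlat, List.mem_append] at h
    rcases h with h | h
    · refine ⟨e, by simp, ?_⟩
      by_cases hb : e.1 <;> simp [pvOpt, hb] at h
      exact h
    · obtain ⟨e', he', hx⟩ := ih h
      exact ⟨e', by simp [he'], hx⟩

lemma pvMin_flat (es : List (Bool × Nat × String))
    (h : es.Pairwise (fun a b => a.2.1 < b.2.1)) :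
    PySem.List.min? (pvFlat es) (fun c => c.1) = pvFirst es := by
  induction es with
  | nil => rfl
  | cons e t ih =>
    rcases List.pairwise_cons.mp h with ⟨h1, h2⟩
    by_cases hb : e.1
    · have hfl : pvFlat (e :: t) = (e.2.1, e.2.2) :: pvFlat t := by
        simp [pvFlat, pvOpt, hb]
      rw [hfl]
      cases hm : PySem.List.min? ((e.2.1, e.2.2) :: pvFlat t) (fun c => c.1) with
      | none => exact absurd ((PySem.List.min?_eq_none_iff _ _).mp hm) (by simp)
      | some m =>
        have hmem := PySem.List.min?_mem hm
        have hle := PySem.List.min?_isMin hm (e.2.1, e.2.2) (by simp)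
        have hme : m = (e.2.1, e.2.2) := by
          rcases List.mem_cons.mp hmem with h' | h'
          · exact h'
          · obtain ⟨e', he', hx⟩ := pvMem_flat h'
            have := h1 e' he'
            rw [hx] at hle
            simp at hle
            omega
        simp [pvFirst, hb, hme]
    · have hfl : pvFlat (e :: t) = pvFlat t := by simp [pvFlat, pvOpt, hb]
      rw [hfl, ih h2]
      simp [pvFirst, hb]

lemma pvEntries_pairwise (rc : String) :
    (pvEntries rc).Pairwise (fun a b => a.2.1 < b.2.1) := by
  simp [pvEntries, List.pairwise_cons]

lemma pvBest_eq (rc : String) :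
    pvBestLabel rc = (pvFirst (pvEntries rc)).map (fun c : Nat × String => c.2) := by
  unfold pvBestLabel
  rw [pvCands_eq, pvMin_flat _ (pvEntries_pairwise rc)]
  cases pvFirst (pvEntries rc) <;> rfl

-- apply Option label to the dict (A's branch outcome)
def pvApply (domain : String) (v : PySem.Dict String (List String)) : Option String → PySem.Dict String (List String)
  | some l => v.modify l [] (· ++ [domain])
  | none => v

lemma pvFirst_entries (rc : String) : pvFirst (pvEntries rc) =
  (if PySem.Str.startswith rc "MS=" then some ((0:Nat), "Microsoft 365")
   else if PySem.Str.isIn "apple-domain-verification" rc then some (1, "Apple")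
   else if PySem.Str.isIn "docusign" (PySem.Str.lower rc) then some (2, "DocuSign")
   else if PySem.Str.isIn "mongodb-site-verification" rc then some (3, "MongoDB")
   else if PySem.Str.isIn "globalsign-domain-verification" rc then some (4, "GlobalSign")
   else if PySem.Str.isIn "google-site-verification" rc then some (5, "Google")
   else if PySem.Str.isIn "adobe-idp-site-verification" rc then some (6, "Adobe IDP")
   else if PySem.Str.isIn "atlassian-domain-verification" rc then some (7, "Atlassian")
   else if PySem.Str.isIn "facebook-domain-verification" rc then some (8, "Facebook")
   else if PySem.Str.isIn "zoom-domain-verification" rc then some (9, "Zoom")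
   else if PySem.Str.isIn "stripe-verification" rc then some (10, "Stripe")
   else if PySem.Str.isIn "cisco-ci-domain-verification" rc then some (11, "Webex/Cisco")
   else if PySem.Str.isIn "slack-site-verification" rc then some (12, "Slack")
   else if (PySem.Str.isIn "github-domain-verification" rc || PySem.Str.isIn "github-challenge" rc) then some (13, "GitHub")
   else if PySem.Str.isIn "okta-domain-verification" rc then some (14, "Okta")
   else none) := rfl
lemma pvStepA_eq (d : String) (v : PySem.Dict String (List String)) (record : String) :
    pvStepA d v record = pvApply d v (pvBestLabel (PySem.Str.stripChars record "\"")) := by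
  rw [pvBest_eq, pvFirst_entries]
  simp only [apply_ite (Option.map (fun c : Nat × String => c.2)),
             apply_ite (pvApply d v), Option.map_some, Option.map_none]
  simp only [pvApply, pvStepA]

-- B's inner fold appends exactly the classified pairs
lemma pvCollect_append (d : String) (records : List String) :
    ∀ acc, records.foldl (pvCollect d) acc =
      acc ++ records.filterMap (fun r => (pvBestLabel (PySem.Str.stripChars r "\"")).map (fun l => (l, d))) := by
  induction records with
  | nil => simp
  | cons r t ih =>
    intro acc
    simp only [List.foldl_cons, List.filterMap_cons]
    rw [ih]
    unfold pvCollect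
    cases pvBestLabel (PySem.Str.stripChars r "\"") <;> simp

-- the flat classified stream of the whole input
def pvFlatAll (dns_info : List (String × List (String × List String))) : List (String × String) :=
  dns_info.flatMap (fun p => (((PySem.Dict.mk p.2).getD "txt" []).filterMap
    (fun r => (pvBestLabel (PySem.Str.stripChars r "\"")).map (fun l => (l, p.1)))))

-- A's inner fold is grouping of the classified pairs
lemma pvA_inner (d : String) (records : List String) :
    ∀ v, records.foldl (pvStepA d) v =
      (records.filterMap (fun r => (pvBestLabel (PySem.Str.stripChars r "\"")).map (fun l => (l, d)))).foldl pvGroupStep v := by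
  induction records with
  | nil => simp
  | cons r t ih =>
    intro v
    simp only [List.foldl_cons, List.filterMap_cons]
    rw [pvStepA_eq]
    cases pvBestLabel (PySem.Str.stripChars r "\"") with
    | none => simp [pvApply, ih]
    | some l => simp [pvApply, pvGroupStep, ih]

lemma pvA_fold (dns_info : List (String × List (String × List String))) :
    ∀ v, dns_info.foldl (fun v p => (((PySem.Dict.mk p.2).getD "txt" []).foldl (pvStepA p.1) v)) v =
      (pvFlatAll dns_info).foldl pvGroupStep v := by
  induction dns_info with
  | nil => simp [pvFlatAll]
  | cons p t ih =>
    intro v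
    simp only [List.foldl_cons]
    rw [pvA_inner, ih]
    simp [pvFlatAll, List.foldl_append]

lemma pvB_labeled (dns_info : List (String × List (String × List String))) :
    ∀ acc, dns_info.foldl (fun acc p => (((PySem.Dict.mk p.2).getD "txt" []).foldl (pvCollect p.1) acc)) acc =
      acc ++ pvFlatAll dns_info := by
  induction dns_info with
  | nil => simp [pvFlatAll]
  | cons p t ih =>
    intro acc
    simp only [List.foldl_cons]
    rw [pvCollect_append, ih]
    simp [pvFlatAll]

-- ===== VERDICT (by name: the statement is the Claim_ definition above) =====
theorem extract_verification_tokens_spec : Claim_equal_extract_verification_tokens := by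
  intro dns_info _
  unfold Spec_extract_verification_tokens extract_verification_tokens extract_verification_tokens_alt
  rw [pvA_fold, pvB_labeled]
  simp
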